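-- pv_equiv track=rewrite | github.com/e-yc/rosetta | activation_experiment/corpus_builder.py | _multilingual_fallback
-- ===== SOURCE A (Python) =====
-- def _multilingual_fallback(count):
--     """Hardcoded multilingual sentences (German, French, Spanish)."""
--     base = [
--         "Die Quantenmechanik beschreibt das Verhalten von Teilchen auf subatomarer Ebene und stellt unser Verständnis der physikalischen Welt grundlegend in Frage.",
--         "Le développement de l'intelligence artificielle transforme profondément notre société, de la médecine à l'éducation en passant par les transports.",
--         "La biodiversidad de los ecosistemas tropicales es extraordinariamente rica y alberga millones de especies que aún no han sido catalogadas por la ciencia.",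
--         "Erneuerbare Energien wie Solar- und Windkraft spielen eine immer wichtigere Rolle bei der Bekämpfung des Klimawandels und der Energiewende.",
--         "La révolution numérique a profondément changé la façon dont nous communiquons, travaillons et accédons à l'information au quotidien.",
--         "El cambio climático representa uno de los mayores desafíos de nuestra generación y requiere una acción coordinada a nivel mundial.",
--         "Die deutsche Automobilindustrie steht vor einem tiefgreifenden Wandel durch die Elektrifizierung und die Entwicklung autonomer Fahrsysteme.",
--         "Les neurosciences computationnelles permettent de mieux comprendre le fonctionnement du cerveau humain grâce à des modèles mathématiques sophistiqués.",
--         "La literatura latinoamericana del siglo veinte produjo obras maestras que revolucionaron las formas narrativas y expandieron los límites de la ficción.",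
--         "Künstliche Intelligenz und maschinelles Lernen revolutionieren die medizinische Diagnostik und ermöglichen präzisere Behandlungsmethoden.",
--         "L'architecture gothique des cathédrales médiévales témoigne de l'extraordinaire maîtrise technique des bâtisseurs du Moyen Âge.",
--         "Los avances en la edición genética mediante la tecnología CRISPR abren nuevas posibilidades para el tratamiento de enfermedades hereditarias.",
--         "Die Philosophie Immanuel Kants hat das europäische Denken nachhaltig geprägt und bleibt ein zentraler Bezugspunkt der modernen Erkenntnistheorie.",
--         "La gastronomie française est reconnue mondialement pour sa diversité, sa sophistication et son attachement aux produits du terroir.",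
--         "El telescopio espacial James Webb está revelando detalles sin precedentes sobre las primeras galaxias que se formaron después del Big Bang.",
--     ]
--     result = []
--     while len(result) < count:
--         result.extend(base)
--     return result[:count]
-- ===== SOURCE B (Python) =====
-- def _multilingual_fallback(count):
--     """Hardcoded multilingual sentences (German, French, Spanish)."""
--     base = [
--         "Die Quantenmechanik beschreibt das Verhalten von Teilchen auf subatomarer Ebene und stellt unser Verständnis der physikalischen Welt grundlegend in Frage.",
--         "Le développement de l'intelligence artificielle transforme profondément notre société, de la médecine à l'éducation en passant par les transports.",
--         "La biodiversidad de los ecosistemas tropicales es extraordinariamente rica y alberga millones de especies que aún no han sido catalogadas por la ciencia.",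
--         "Erneuerbare Energien wie Solar- und Windkraft spielen eine immer wichtigere Rolle bei der Bekämpfung des Klimawandels und der Energiewende.",
--         "La révolution numérique a profondément changé la façon dont nous communiquons, travaillons et accédons à l'information au quotidien.",
--         "El cambio climático representa uno de los mayores desafíos de nuestra generación y requiere una acción coordinada a nivel mundial.",
--         "Die deutsche Automobilindustrie steht vor einem tiefgreifenden Wandel durch die Elektrifizierung und die Entwicklung autonomer Fahrsysteme.",
--         "Les neurosciences computationnelles permettent de mieux comprendre le fonctionnement du cerveau humain grâce à des modèles mathématiques sophistiqués.",
--         "La literatura latinoamericana del siglo veinte produjo obras maestras que revolucionaron las formas narrativas y expandieron los límites de la ficción.",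
--         "Künstliche Intelligenz und maschinelles Lernen revolutionieren die medizinische Diagnostik und ermöglichen präzisere Behandlungsmethoden.",
--         "L'architecture gothique des cathédrales médiévales témoigne de l'extraordinaire maîtrise technique des bâtisseurs du Moyen Âge.",
--         "Los avances en la edición genética mediante la tecnología CRISPR abren nuevas posibilidades para el tratamiento de enfermedades hereditarias.",
--         "Die Philosophie Immanuel Kants hat das europäische Denken nachhaltig geprägt und bleibt ein zentraler Bezugspunkt der modernen Erkenntnistheorie.",
--         "La gastronomie française est reconnue mondialement pour sa diversité, sa sophistication et son attachement aux produits du terroir.",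
--         "El telescopio espacial James Webb está revelando detalles sin precedentes sobre las primeras galaxias que se formaron después del Big Bang.",
--     ]
--     return [base[i % 15] for i in range(count)]
-- ===== Notes on version B (the rewrite author's own statement) =====
-- stated objective: alternative
-- what changed: Instead of growing a buffer by repeatedly extending it with the whole base list and slicing, B builds the result element-by-element: the i-th output is selected directly by modular indexing base[i % 15] over range(count), so no over-long intermediate list is ever built or sliced.
import Mathlib
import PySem

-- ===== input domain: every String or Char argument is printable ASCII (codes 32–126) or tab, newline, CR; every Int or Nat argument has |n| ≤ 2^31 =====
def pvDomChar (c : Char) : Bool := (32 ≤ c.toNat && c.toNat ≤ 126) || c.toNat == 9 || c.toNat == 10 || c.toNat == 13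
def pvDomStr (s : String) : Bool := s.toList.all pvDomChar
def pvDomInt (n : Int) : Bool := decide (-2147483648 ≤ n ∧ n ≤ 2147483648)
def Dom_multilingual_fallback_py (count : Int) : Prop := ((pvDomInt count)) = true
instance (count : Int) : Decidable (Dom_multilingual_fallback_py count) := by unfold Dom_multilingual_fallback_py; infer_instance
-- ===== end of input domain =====

-- B replaces A's grow-a-buffer-then-slice loop with direct per-element construction: the i-th
-- output is base[i % 15] for i in range(count) (objective: alternative, no over-long intermediate).

-- ===== PORT A =====
def pvBase : List String := [
  "Die Quantenmechanik beschreibt das Verhalten von Teilchen auf subatomarer Ebene und stellt unser Verständnis der physikalischen Welt grundlegend in Frage.",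
  "Le développement de l'intelligence artificielle transforme profondément notre société, de la médecine à l'éducation en passant par les transports.",
  "La biodiversidad de los ecosistemas tropicales es extraordinariamente rica y alberga millones de especies que aún no han sido catalogadas por la ciencia.",
  "Erneuerbare Energien wie Solar- und Windkraft spielen eine immer wichtigere Rolle bei der Bekämpfung des Klimawandels und der Energiewende.",
  "La révolution numérique a profondément changé la façon dont nous communiquons, travaillons et accédons à l'information au quotidien.",
  "El cambio climático representa uno de los mayores desafíos de nuestra generación y requiere una acción coordinada a nivel mundial.",
  "Die deutsche Automobilindustrie steht vor einem tiefgreifenden Wandel durch die Elektrifizierung und die Entwicklung autonomer Fahrsysteme.",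
  "Les neurosciences computationnelles permettent de mieux comprendre le fonctionnement du cerveau humain grâce à des modèles mathématiques sophistiqués.",
  "La literatura latinoamericana del siglo veinte produjo obras maestras que revolucionaron las formas narrativas y expandieron los límites de la ficción.",
  "Künstliche Intelligenz und maschinelles Lernen revolutionieren die medizinische Diagnostik und ermöglichen präzisere Behandlungsmethoden.",
  "L'architecture gothique des cathédrales médiévales témoigne de l'extraordinaire maîtrise technique des bâtisseurs du Moyen Âge.",
  "Los avances en la edición genética mediante la tecnología CRISPR abren nuevas posibilidades para el tratamiento de enfermedades hereditarias.",
  "Die Philosophie Immanuel Kants hat das europäische Denken nachhaltig geprägt und bleibt ein zentraler Bezugspunkt der modernen Erkenntnistheorie.",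
  "La gastronomie française est reconnue mondialement pour sa diversité, sa sophistication et son attachement aux produits du terroir.",
  "El telescopio espacial James Webb está revelando detalles sin precedentes sobre las primeras galaxias que se formaron después del Big Bang."]

-- A's while loop: extend result by base while len(result) < count
def pvLoopA (count : Int) (result : List String) : List String :=
  if (result.length : Int) < count then pvLoopA count (result ++ pvBase) else result
termination_by (count - result.length).toNat
decreasing_by
  simp only [List.length_append]
  have : (result.length : Int) < count := by assumption
  have hb : pvBase.length = 15 := by decide
  omega

def multilingual_fallback_py (count : Int) : List String :=
  PySem.List.slice (pvLoopA count []) none (some count)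

-- ===== PORT B =====
-- Source B: return [base[i % 15] for i in range(count)]
def multilingual_fallback_py_alt (count : Int) : List String :=
  (PySem.List.pyRange 0 count 1).map (fun i => PySem.List.pyGetD pvBase (PySem.Int.mod i 15) "")

-- ===== PRECONDITION & SPEC =====
def Spec_multilingual_fallback_py (count : Int) (out : List String) : Prop := out = multilingual_fallback_py_alt count
instance (count : Int) (out : List String) : Decidable (Spec_multilingual_fallback_py count out) := by unfold Spec_multilingual_fallback_py; infer_instance

-- ===== CLAIM (what is proved, stated in full; the proofs are below) =====
def Claim_equal_multilingual_fallback_py : Prop := ∀ (count : Int), Dom_multilingual_fallback_py count → Spec_multilingual_fallback_py count (multilingual_fallback_py count)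

-- ===== LEMMAS AND PROOFS =====
def pvRep (n : Nat) : List String := (List.replicate n pvBase).flatten

lemma pvRep_length (n : Nat) : (pvRep n).length = 15 * n := by
  induction n with
  | zero => rfl
  | succ m ih =>
      simp only [pvRep, List.replicate_succ, List.flatten_cons, List.length_append] at *
      have hb : pvBase.length = 15 := by decide
      omega

lemma pvRep_succ (n : Nat) : pvRep (n + 1) = pvRep n ++ pvBase := by
  simp [pvRep, List.replicate_succ', List.flatten_append]

lemma pvLoopA_rep (count : Int) (k : Nat) (hk : count ≤ 15 * k)
    (hmin : 15 * (k : Int) - 15 < count) :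
    ∀ j : Nat, j ≤ k → pvLoopA count (pvRep j) = pvRep k := by
  intro j hj
  induction hd : k - j generalizing j with
  | zero =>
      have hjk : j = k := by omega
      subst hjk
      rw [pvLoopA]
      simp only [pvRep_length]
      rw [if_neg (by push_cast; omega)]
  | succ m ih =>
      have hjlt : j < k := by omega
      rw [pvLoopA]
      simp only [pvRep_length]
      rw [if_pos (by push_cast; omega)]
      rw [← pvRep_succ]
      exact ih (j + 1) (by omega) (by omega)

lemma pvLoopA_nonpos (count : Int) (h : count ≤ 0) : pvLoopA count [] = [] := by
  rw [pvLoopA]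
  simp only [List.length_nil]
  rw [if_neg (by omega)]

lemma pvRep_getElem? (k j : Nat) (h : j < 15 * k) :
    (pvRep k)[j]? = pvBase[j % 15]? := by
  induction k generalizing j with
  | zero => omega
  | succ m ih =>
      have hrep : pvRep (m + 1) = pvBase ++ pvRep m := by
        simp [pvRep, List.replicate_succ, List.flatten_cons]
      rw [hrep, List.getElem?_append]
      by_cases hj : j < 15
      · rw [if_pos (by simpa using hj), Nat.mod_eq_of_lt hj]
      · rw [if_neg (by simpa using hj)]
        have h15 : pvBase.length = 15 := by decide
        rw [h15, Nat.mod_eq_sub_mod (by omega)]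
        exact ih (j - 15) (by omega)

-- B, restricted to a nonnegative count n, is a map over List.range n of modular lookups
lemma pvTake_rep_eq_map (n k : Nat) (h : n ≤ 15 * k) :
    (pvRep k).take n = (List.range n).map (fun j => pvBase.getD (j % 15) "") := by
  apply List.ext_getElem?
  intro j
  rw [List.getElem?_take, List.getElem?_map]
  by_cases hj : j < n
  · rw [if_pos hj, pvRep_getElem? k j (by omega)]
    have hlt : j % 15 < pvBase.length := by
      have : pvBase.length = 15 := by decide
      omega
    simp [hj, List.getD, List.getElem?_eq_getElem hlt]
  · rw [if_neg hj, List.getElem?_eq_none (by simpa using Nat.not_lt.mp hj)]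
    rfl

-- ===== VERDICT (by name: the statement is the Claim_ definition above) =====
theorem multilingual_fallback_py_spec : Claim_equal_multilingual_fallback_py := by
  intro count _
  unfold Spec_multilingual_fallback_py multilingual_fallback_py multilingual_fallback_py_alt
  by_cases h : count ≤ 0
  · rw [pvLoopA_nonpos count h, PySem.List.pyRange_one_eq_nil h]
    simp [PySem.List.slice]
  · have h0 : (0 : Int) ≤ count := by omega
    obtain ⟨n, hcn⟩ : ∃ n : Nat, (n : Int) = count := ⟨count.toNat, Int.toNat_of_nonneg h0⟩
    have hk1 : n ≤ 15 * ((n + 14) / 15) := by omega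
    have hA : pvLoopA count [] = pvRep ((n + 14) / 15) := by
      have hdiv : 15 * ((n + 14) / 15) ≤ n + 14 := by omega
      simpa [pvRep] using
        pvLoopA_rep count ((n + 14) / 15) (by push_cast; omega) (by push_cast; omega) 0 (by omega)
    rw [hA, PySem.List.slice_to _ h0, PySem.List.pyRange_one]
    rw [← hcn]
    simp only [Int.sub_zero, Int.toNat_natCast, Int.zero_add]
    rw [pvTake_rep_eq_map n ((n + 14) / 15) hk1, List.map_map]
    apply List.map_congr_left
    intro j hj
    have hm : PySem.Int.mod ((j : Nat) : Int) 15 = ((j % 15 : Nat) : Int) := by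
      exact_mod_cast PySem.Int.mod_natCast j 15
    simp only [Function.comp, hm, PySem.List.pyGetD_natCast]
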